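-- pv_equiv track=rewrite | github.com/sykwon/sigmod2025like | src/LPLM/compute_ground_truth_by_alg.py | LIKE_pattern_to_newLanguage
-- ===== SOURCE A (Python) =====
-- def LIKE_pattern_to_newLanguage(liste):
--     transformed_pattern = ''
--     for key in liste:
--         if len(key) == 1:
--             transformed_pattern += key
--         else:
--             new = ''
--             count = 0
--             for char in key:
--                 if count < 1:
--                     new += char
--                     count += 1
--                 else:
--                     if new[-1] != '_' and char != '_':
--                         new += '$' + char
--                     else:
--                         new += char
--
--             result = ''
--             for ch in new:
--                 if len(result) == 0:
--                     result += ch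
--                 elif result[-1] == '^' and ch == '_':
--                     result = result[:-1] + '_^'
--                 elif ch == '_':
--                     result += '^'
--                 else:
--                     result += ch
--             new = result
--
--             transformed_pattern += new
--     # transformed_pattern = transformed_pattern.replace('_', '^')
--     # result = ''
--     # for ch in transformed_pattern:
--     #     if len(result) == 0:
--     #         result += ch
--     #     elif result[-1] == '^' and ch == '_':
--     #         result = result[:-1] + '_^'
--     #     elif ch == '_':
--     #         result += '^'
--     #     else:
--     #         result += ch
--     # transformed_pattern = result
--
--     return transformed_pattern
-- ===== SOURCE B (Python) =====
-- def LIKE_pattern_to_newLanguage(liste):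
--     def push(buf, e):
--         # pass-2 state machine, applied one character at a time
--         if not buf:
--             buf.append(e)
--         elif buf[-1] == '^' and e == '_':
--             buf[-1] = '_'
--             buf.append('^')
--         elif e == '_':
--             buf.append('^')
--         else:
--             buf.append(e)
--
--     parts = []
--     for key in liste:
--         if len(key) == 1:
--             parts.append(key)
--         else:
--             buf = []
--             if key:
--                 push(buf, key[0])
--                 for p, c in zip(key, key[1:]):
--                     if p != '_' and c != '_':
--                         push(buf, '$')
--                     push(buf, c)
--             parts.append(''.join(buf))
--     return ''.join(parts)
-- ===== Notes on version B (the rewrite author's own statement) =====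
-- stated objective: simpler
-- what changed: Fuses A's two per-key passes (first a '$'-insertion pass with a count flag and lookback on the built string, then a full rescan through the '_'/'^' state machine) into one left-to-right loop over adjacent character pairs that feeds each emitted character directly through a push step, collecting parts in a list joined once.
import Mathlib
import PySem

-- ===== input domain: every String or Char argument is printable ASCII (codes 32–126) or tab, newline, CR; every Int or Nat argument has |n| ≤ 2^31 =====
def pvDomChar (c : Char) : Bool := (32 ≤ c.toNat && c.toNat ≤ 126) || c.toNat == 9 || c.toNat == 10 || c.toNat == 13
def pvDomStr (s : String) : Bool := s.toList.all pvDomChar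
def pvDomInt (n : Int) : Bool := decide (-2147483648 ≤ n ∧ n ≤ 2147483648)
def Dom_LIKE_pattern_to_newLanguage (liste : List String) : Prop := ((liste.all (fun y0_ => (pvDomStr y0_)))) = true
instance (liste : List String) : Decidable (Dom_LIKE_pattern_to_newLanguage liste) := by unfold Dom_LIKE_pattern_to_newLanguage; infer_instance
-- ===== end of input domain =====

-- B fuses A's two per-key passes into one pairwise loop feeding a push step; objective: simpler.

-- ===== PORT A =====
-- pass 1 of A: insert '$' between adjacent characters when neither is '_' (count flag + lookback new[-1])
def pvPass1Step (st : List Char × Int) (char : Char) : List Char × Int :=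
  if st.2 < 1 then (st.1 ++ [char], st.2 + 1)
  else if st.1.getLast? ≠ some '_' ∧ char ≠ '_' then (st.1 ++ ['$', char], st.2)
  else (st.1 ++ [char], st.2)

-- pass 2 of A: the '_' → '^' state machine with the '^_' → '_^' swap on the built result
def pvPass2Step (result : List Char) (ch : Char) : List Char :=
  if result = [] then result ++ [ch]
  else if result.getLast? = some '^' ∧ ch = '_' then result.dropLast ++ ['_', '^']
  else if ch = '_' then result ++ ['^']
  else result ++ [ch]

def LIKE_pattern_to_newLanguage (liste : List String) : String :=
  String.mk (liste.foldl (fun transformed key =>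
    if key.toList.length = 1 then transformed ++ key.toList
    else
      let new := (key.toList.foldl pvPass1Step ([], 0)).1
      let result := new.foldl pvPass2Step []
      transformed ++ result) [])

-- ===== PORT B =====
-- B's push: one character through the pass-2 state machine (same branch logic, applied on the fly)
def pvPush (buf : List Char) (e : Char) : List Char :=
  if buf = [] then [e]
  else if buf.getLast? = some '^' ∧ e = '_' then buf.dropLast ++ ['_', '^']
  else if e = '_' then buf ++ ['^']
  else buf ++ [e]

-- B's per-key single pass over adjacent pairs zip(key, key[1:])
def pvAltKey (cs : List Char) : List Char :=
  match cs with
  | [] => []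
  | c0 :: rest =>
    ((c0 :: rest).zip rest).foldl
      (fun buf pc => pvPush (if pc.1 ≠ '_' ∧ pc.2 ≠ '_' then pvPush buf '$' else buf) pc.2)
      (pvPush [] c0)

def LIKE_pattern_to_newLanguage_alt (liste : List String) : String :=
  String.mk ((liste.map (fun key =>
    if key.toList.length = 1 then key.toList else pvAltKey key.toList)).flatten)

-- ===== PRECONDITION & SPEC =====
def Spec_LIKE_pattern_to_newLanguage (liste : List String) (out : String) : Prop := out = LIKE_pattern_to_newLanguage_alt liste
instance (liste : List String) (out : String) : Decidable (Spec_LIKE_pattern_to_newLanguage liste out) := by unfold Spec_LIKE_pattern_to_newLanguage; infer_instance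

-- ===== CLAIM (what is proved, stated in full; the proofs are below) =====
def Claim_equal_LIKE_pattern_to_newLanguage : Prop := ∀ (liste : List String), Dom_LIKE_pattern_to_newLanguage liste → Spec_LIKE_pattern_to_newLanguage liste (LIKE_pattern_to_newLanguage liste)

-- ===== LEMMAS AND PROOFS =====

-- what pass 1 emits after the first character: '$'-separated copies, threaded by the previous char
def pvExpand (p : Char) : List Char → List Char
  | [] => []
  | c :: cs => (if p ≠ '_' ∧ c ≠ '_' then ['$', c] else [c]) ++ pvExpand c cs

theorem pvPass1_expand (rest : List Char) : ∀ (p : Char) (acc : List Char) (k : Int),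
    acc ≠ [] → acc.getLast? = some p → 1 ≤ k →
    (rest.foldl pvPass1Step (acc, k)).1 = acc ++ pvExpand p rest := by
  induction rest with
  | nil => intro p acc k _ _ _; simp [pvExpand]
  | cons c cs ih =>
    intro p acc k hne hlast hk
    have hk' : ¬ k < 1 := by omega
    by_cases hc : p ≠ '_' ∧ c ≠ '_'
    · have : acc.getLast? ≠ some '_' ∧ c ≠ '_' := by
        rw [hlast]; exact ⟨by simpa using hc.1, hc.2⟩
      simp only [List.foldl_cons, pvPass1Step, if_neg hk', if_pos this]
      rw [ih c (acc ++ ['$', c]) k (by simp) (by simp) hk]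
      simp [pvExpand, hc]
    · have : ¬ (acc.getLast? ≠ some '_' ∧ c ≠ '_') := by
        rw [hlast]; simpa using hc
      simp only [List.foldl_cons, pvPass1Step, if_neg hk', if_neg this]
      rw [ih c (acc ++ [c]) k (by simp) (by simp) hk]
      simp [pvExpand, hc]

theorem pvStep_eq (r : List Char) (c : Char) : pvPass2Step r c = pvPush r c := by
  by_cases h : r = [] <;> simp [pvPass2Step, pvPush, h]

theorem pvFold_expand (rest : List Char) : ∀ (p : Char) (buf : List Char),
    (pvExpand p rest).foldl pvPass2Step buf
      = ((p :: rest).zip rest).foldl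
          (fun buf pc => pvPush (if pc.1 ≠ '_' ∧ pc.2 ≠ '_' then pvPush buf '$' else buf) pc.2)
          buf := by
  induction rest with
  | nil => intro p buf; simp [pvExpand]
  | cons c cs ih =>
    intro p buf
    by_cases hc : p ≠ '_' ∧ c ≠ '_'
    · simp only [pvExpand, if_pos hc, List.cons_append, List.nil_append, List.foldl_cons,
        List.zip_cons_cons, pvStep_eq]
      rw [ih c]
    · simp only [pvExpand, if_neg hc, List.cons_append, List.nil_append, List.foldl_cons,
        List.zip_cons_cons, pvStep_eq]
      rw [ih c]

theorem pvKey_eq (cs : List Char) :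
    ((cs.foldl pvPass1Step ([], 0)).1.foldl pvPass2Step []) = pvAltKey cs := by
  cases cs with
  | nil => simp [pvAltKey]
  | cons c0 rest =>
    have h1 : ((c0 :: rest).foldl pvPass1Step ([], 0)).1 = [c0] ++ pvExpand c0 rest := by
      simp only [List.foldl_cons, pvPass1Step]
      norm_num
      exact pvPass1_expand rest c0 [c0] 1 (by simp) (by simp) (by omega)
    rw [h1]
    simp only [List.cons_append, List.nil_append, List.foldl_cons]
    rw [pvStep_eq, pvFold_expand]
    have : pvPush [] c0 = [c0] := by simp [pvPush]
    rw [this]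
    rfl

theorem pvFoldl_append (l : List String) : ∀ (acc : List Char),
    l.foldl (fun transformed key =>
      if key.toList.length = 1 then transformed ++ key.toList
      else
        let new := (key.toList.foldl pvPass1Step ([], 0)).1
        let result := new.foldl pvPass2Step []
        transformed ++ result) acc
    = acc ++ (l.map (fun key =>
        if key.toList.length = 1 then key.toList else pvAltKey key.toList)).flatten := by
  induction l with
  | nil => intro acc; simp
  | cons key l ih =>
    intro acc
    rw [List.foldl_cons, ih]
    by_cases h : key.toList.length = 1
    · rw [if_pos h, List.map_cons, List.flatten_cons, if_pos h, List.append_assoc]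
    · simp only [if_neg h, List.map_cons, List.flatten_cons]
      rw [pvKey_eq, List.append_assoc]

-- ===== VERDICT (by name: the statement is the Claim_ definition above) =====
theorem LIKE_pattern_to_newLanguage_spec : Claim_equal_LIKE_pattern_to_newLanguage := by
  intro liste _
  unfold Spec_LIKE_pattern_to_newLanguage LIKE_pattern_to_newLanguage LIKE_pattern_to_newLanguage_alt
  rw [pvFoldl_append]
  rfl
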